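-- pv_equiv track=rewrite | github.com/galij899/candy_delivery_app | apis/models.py | select_orders_by_weight
-- ===== SOURCE A (Python) =====
-- def select_orders_by_weight(d, max_weight): # todo: prettify this function
--     ids = sorted(d, key=d.get)
--     s = 0
--     ls = []
--     for id_ in ids:
--         if s + d.get(id_) < max_weight:
--             s += d.get(id_)
--             ls.append(id_)
--         else:
--             break
--     return ls #s, ls, [d.get(i) for i in ls]
-- ===== SOURCE B (Python) =====
-- def select_orders_by_weight(d, max_weight):
--     # selection-based greedy: repeatedly extract the lightest remaining order
--     # (first one on ties, like a stable sort) instead of sorting up front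
--     remaining = list(d)
--     s = 0
--     ls = []
--     while remaining:
--         m = min(remaining, key=d.get)
--         if s + d[m] < max_weight:
--             s += d[m]
--             ls.append(m)
--             remaining.remove(m)
--         else:
--             break
--     return ls
-- ===== Notes on version B (the rewrite author's own statement) =====
-- stated objective: alternative
-- what changed: B drops the upfront sort entirely: a selection-based greedy while-loop repeatedly extracts the first-minimum-weight order with min() and removes it from the remaining pool, which is proved to traverse exactly the stable sorted order.
import Mathlib
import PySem

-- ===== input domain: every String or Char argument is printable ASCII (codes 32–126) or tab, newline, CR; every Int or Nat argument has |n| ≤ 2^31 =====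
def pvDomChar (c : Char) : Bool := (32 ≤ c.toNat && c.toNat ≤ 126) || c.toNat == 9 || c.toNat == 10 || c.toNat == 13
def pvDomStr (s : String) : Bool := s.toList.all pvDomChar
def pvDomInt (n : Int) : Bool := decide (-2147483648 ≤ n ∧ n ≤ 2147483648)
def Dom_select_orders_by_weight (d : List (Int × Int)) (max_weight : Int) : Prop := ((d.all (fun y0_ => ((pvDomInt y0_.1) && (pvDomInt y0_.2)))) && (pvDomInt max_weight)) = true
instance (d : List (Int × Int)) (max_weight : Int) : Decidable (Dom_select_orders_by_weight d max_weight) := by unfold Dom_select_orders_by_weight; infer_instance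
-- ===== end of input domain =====

-- B replaces A's sort-then-scan by a selection-based greedy: it repeatedly extracts the
-- lightest remaining order with min() (first one on ties, matching the stable sort) and
-- never sorts (alternative algorithm, O(n^2) vs O(n log n + n) — not faster).

-- ===== PORT A =====
-- A's for-loop with break over the sorted keys: state (s, ls); 'break'/end of list returns ls.
def pvALoop (dd : PySem.Dict Int Int) (mw : Int) : List Int → Int → List Int → List Int
  | [], _, ls => ls
  | i :: rest, s, ls =>
      if s + dd.getD i 0 < mw then pvALoop dd mw rest (s + dd.getD i 0) (ls ++ [i])
      else ls

def select_orders_by_weight (d : List (Int × Int)) (max_weight : Int) : List Int :=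
  let dd := PySem.Dict.ofList d           -- the Python dict (duplicate keys: last value wins)
  let ids := PySem.List.sorted dd.keys (fun k => dd.getD k 0) false   -- sorted(d, key=d.get)
  pvALoop dd max_weight ids 0 []

-- ===== PORT B =====
-- termination helper for B's while-loop: remaining.remove(m) shortens the list
theorem pvRemove?_length {xs : List Int} {v : Int} {r : List Int}
    (h : PySem.List.remove? xs v = some r) : r.length < xs.length := by
  induction xs generalizing r with
  | nil => simp [PySem.List.remove?] at h
  | cons x t ih =>
      by_cases hx : x = v
      · subst hx; rw [PySem.List.remove?_cons_self] at h
        cases h; simp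
      · rw [PySem.List.remove?_cons_of_ne t hx] at h
        cases hr : PySem.List.remove? t v with
        | none => rw [hr] at h; simp at h
        | some r' => rw [hr] at h; simp at h; subst h; simpa using Nat.succ_lt_succ (ih hr)

-- B's while-loop: m = min(remaining, key=d.get); take it and remove it, or break.
def pvSelLoop (dd : PySem.Dict Int Int) (mw : Int) (remaining : List Int) (s : Int) (ls : List Int) : List Int :=
  match PySem.List.min? remaining (fun k => dd.getD k 0) with
  | none => ls                                  -- 'while remaining' fails
  | some m =>
      if s + dd.getD m 0 < mw then
        match hr : PySem.List.remove? remaining m with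
        | none => ls                            -- unreachable: m ∈ remaining
        | some rest => pvSelLoop dd mw rest (s + dd.getD m 0) (ls ++ [m])
      else ls
termination_by remaining.length
decreasing_by exact pvRemove?_length hr

def select_orders_by_weight_alt (d : List (Int × Int)) (max_weight : Int) : List Int :=
  let dd := PySem.Dict.ofList d
  pvSelLoop dd max_weight dd.keys 0 []          -- remaining = list(d)

-- ===== PRECONDITION & SPEC =====
def Spec_select_orders_by_weight (d : List (Int × Int)) (max_weight : Int) (out : List Int) : Prop := out = select_orders_by_weight_alt d max_weight
instance (d : List (Int × Int)) (max_weight : Int) (out : List Int) : Decidable (Spec_select_orders_by_weight d max_weight out) := by unfold Spec_select_orders_by_weight; infer_instance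

-- ===== CLAIM (what is proved, stated in full; the proofs are below) =====
def Claim_equal_select_orders_by_weight : Prop := ∀ (d : List (Int × Int)) (max_weight : Int), Dom_select_orders_by_weight d max_weight → Spec_select_orders_by_weight d max_weight (select_orders_by_weight d max_weight)

-- ===== LEMMAS AND PROOFS =====

-- running 'first minimum' of Python's min(…, key=…) once the accumulator is seeded
def pvMinFold (key : Int → Int) (a : Int) (t : List Int) : Int :=
  t.foldl (fun m y => if key y < key m then y else m) a

-- insert x before the FIRST element of ≥ key: where the stable sort puts the EARLIEST element
def pvInsLE (key : Int → Int) (x : Int) : List Int → List Int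
  | [] => [x]
  | y :: ys => if key x ≤ key y then x :: y :: ys else y :: pvInsLE key x ys

theorem pvMinFold_cons (key : Int → Int) (a y : Int) (t : List Int) :
    pvMinFold key a (y :: t) = pvMinFold key (if key y < key a then y else a) t := by
  simp only [pvMinFold, List.foldl_cons]

theorem pvMin?_cons (key : Int → Int) (t : List Int) :
    ∀ x : Int, PySem.List.min? (x :: t) key = some (pvMinFold key x t) := by
  induction t with
  | nil => intro x; simp [PySem.List.min?, pvMinFold]
  | cons y t ih =>
      intro x
      have e1 : PySem.List.min? (x :: y :: t) key
          = PySem.List.min? ((if key y < key x then y else x) :: t) key := by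
        simp only [PySem.List.min?, List.foldl_cons]
        by_cases h : key y < key x <;> simp [h]
      rw [e1, ih, pvMinFold_cons]

theorem pvMinFold_isMin (key : Int → Int) (a : Int) (t : List Int) :
    key (pvMinFold key a t) ≤ key a ∧ ∀ y ∈ t, key (pvMinFold key a t) ≤ key y := by
  have h := PySem.List.min?_isMin (pvMin?_cons key t a)
  exact ⟨h a (by simp), fun y hy => h y (by simp [hy])⟩

theorem pvMinFold_eq_of_key_eq (key : Int → Int) (t : List Int) :
    ∀ a : Int, key (pvMinFold key a t) = key a → pvMinFold key a t = a := by
  induction t with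
  | nil => intro a _; rfl
  | cons y t ih =>
      intro a h
      rw [pvMinFold_cons] at h ⊢
      by_cases hy : key y < key a
      · rw [if_pos hy] at h ⊢
        have := (pvMinFold_isMin key y t).1
        omega
      · rw [if_neg hy] at h ⊢
        exact ih a h

-- a run whose result strictly beats both its own seed and b gives the same result from seed b
theorem pvMinFold_switch (key : Int → Int) (t : List Int) :
    ∀ a b : Int, key (pvMinFold key a t) < key b → key (pvMinFold key a t) < key a →
      pvMinFold key b t = pvMinFold key a t := by
  induction t with
  | nil => intro a b _ h2; exact absurd h2 (by simp [pvMinFold])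
  | cons z t ih =>
      intro a b h1 h2
      rw [pvMinFold_cons] at h1 h2 ⊢
      rw [pvMinFold_cons]
      by_cases hza : key z < key a
      · rw [if_pos hza] at h1 h2 ⊢
        by_cases hzb : key z < key b
        · rw [if_pos hzb]
        · rw [if_neg hzb]
          have hle : key (pvMinFold key z t) ≤ key z := (pvMinFold_isMin key z t).1
          exact ih z b h1 (by omega)
      · rw [if_neg hza] at h1 h2 ⊢
        by_cases hzb : key z < key b
        · rw [if_pos hzb]
          exact ih a z (by omega) h2
        · rw [if_neg hzb]
          exact ih a b h1 h2

theorem pvMin?_tail (key : Int → Int) {x m : Int} {t : List Int}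
    (h : PySem.List.min? (x :: t) key = some m) (hlt : key m < key x) :
    PySem.List.min? t key = some m := by
  cases t with
  | nil =>
      rw [pvMin?_cons] at h
      simp only [pvMinFold, List.foldl_nil, Option.some.injEq] at h
      subst h; omega
  | cons y t' =>
      rw [pvMin?_cons] at h ⊢
      rw [pvMinFold_cons] at h
      cases h
      by_cases hyx : key y < key x
      · rw [if_pos hyx] at hlt ⊢
      · rw [if_neg hyx] at hlt ⊢
        have hle : key (pvMinFold key x t') ≤ key x := (pvMinFold_isMin key x t').1
        exact congrArg some (pvMinFold_switch key t' x y (by omega) hlt)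

-- inserting a LATER element (strictly-before rule) and an EARLIER one (before-on-ties) commute
theorem pvCommute (key : Int → Int) (x y : Int) (acc : List Int) :
    PySem.List.insertBy (fun a b => decide (key a < key b)) y (pvInsLE key x acc)
      = pvInsLE key x (PySem.List.insertBy (fun a b => decide (key a < key b)) y acc) := by
  induction acc with
  | nil =>
      simp only [pvInsLE, PySem.List.insertBy]
      by_cases h1 : key y < key x
      · rw [if_pos (by simpa using h1)]
        simp [(show ¬ key x ≤ key y by omega)]
      · rw [if_neg (by simpa using h1)]
        simp [(show key x ≤ key y by omega)]
  | cons z acc ih =>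
      simp only [pvInsLE]
      by_cases hxz : key x ≤ key z
      · rw [if_pos hxz]
        simp only [PySem.List.insertBy]
        by_cases hyx : key y < key x
        · rw [if_pos (by simpa using hyx), if_pos (by simp; omega)]
          simp [pvInsLE, (show ¬ key x ≤ key y by omega), (show key x ≤ key z by omega)]
        · rw [if_neg (by simpa using hyx)]
          by_cases hyz : key y < key z
          · rw [if_pos (by simpa using hyz)]
            simp [pvInsLE, (show key x ≤ key y by omega)]
          · rw [if_neg (by simpa using hyz)]
            simp [pvInsLE, hxz]
      · rw [if_neg hxz]
        simp only [PySem.List.insertBy]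
        by_cases hyz : key y < key z
        · rw [if_pos (by simpa using hyz), if_pos (by simpa using hyz)]
          simp [pvInsLE, (show ¬ key x ≤ key y by omega), (show ¬ key x ≤ key z by omega)]
        · rw [if_neg (by simpa using hyz), if_neg (by simpa using hyz)]
          simp only [pvInsLE, if_neg hxz]
          rw [ih]

-- the stable sort of x :: t places the earliest element x by before-on-ties insertion
theorem pvSorted_cons (key : Int → Int) (x : Int) (t : List Int) :
    PySem.List.sorted (x :: t) key false = pvInsLE key x (PySem.List.sorted t key false) := by
  rw [PySem.List.sorted_eq_foldl_insertBy, PySem.List.sorted_eq_foldl_insertBy]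
  suffices h : ∀ (t acc : List Int),
      t.foldl (fun acc x => PySem.List.insertBy (fun a b => decide (key a < key b)) x acc) (pvInsLE key x acc)
        = pvInsLE key x (t.foldl (fun acc x => PySem.List.insertBy (fun a b => decide (key a < key b)) x acc) acc) by
    have h0 : PySem.List.insertBy (fun a b => decide (key a < key b)) x ([] : List Int) = pvInsLE key x [] := by
      simp [PySem.List.insertBy, pvInsLE]
    simpa [h0] using h t []
  intro t
  induction t with
  | nil => intro acc; rfl
  | cons y t ih => intro acc; simp only [List.foldl_cons, pvCommute key x y acc, ih]

theorem pvInsLE_of_le (key : Int → Int) (x : Int) (l : List Int)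
    (h : ∀ y ∈ l, key x ≤ key y) : pvInsLE key x l = x :: l := by
  cases l with
  | nil => rfl
  | cons y ys => simp [pvInsLE, h y (by simp)]

-- selection decomposition of the stable sort: head = first minimum, tail = sort of the rest
theorem pvSel (key : Int → Int) (xs : List Int) {m : Int}
    (h : PySem.List.min? xs key = some m) :
    PySem.List.sorted xs key false = m :: PySem.List.sorted (xs.erase m) key false := by
  induction xs generalizing m with
  | nil => simp [PySem.List.min?] at h
  | cons x t ih =>
      rw [pvMin?_cons] at h
      have hm : m = pvMinFold key x t := by cases h; rfl
      subst hm
      by_cases hlt : key (pvMinFold key x t) < key x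
      · -- the minimum lies in the tail
        have hmx : pvMinFold key x t ≠ x := fun e => by rw [e] at hlt; omega
        have htail : PySem.List.min? t key = some (pvMinFold key x t) :=
          pvMin?_tail key (pvMin?_cons key t x) hlt
        have herase : (x :: t).erase (pvMinFold key x t) = x :: t.erase (pvMinFold key x t) :=
          List.erase_cons_tail (by simp [Ne.symm hmx])
        rw [herase, pvSorted_cons, ih htail, pvSorted_cons]
        simp [pvInsLE, (show ¬ key x ≤ key (pvMinFold key x t) by omega)]
      · -- the head is the (first) minimum
        have hle : key (pvMinFold key x t) ≤ key x := (pvMinFold_isMin key x t).1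
        have hmx : pvMinFold key x t = x := pvMinFold_eq_of_key_eq key t x (by omega)
        rw [hmx]
        have herase : (x :: t).erase x = t := by simp
        rw [herase, pvSorted_cons, pvInsLE_of_le]
        intro y hy
        rw [PySem.List.mem_sorted] at hy
        have h2 := (pvMinFold_isMin key x t).2 y hy
        omega

-- main loop invariant: B's extract-min loop = A's scan of the stable sorted list
theorem pvLoop_agree (dd : PySem.Dict Int Int) (mw : Int) :
    ∀ (n : Nat) (rem : List Int), rem.length ≤ n → ∀ (s : Int) (ls : List Int),
      pvSelLoop dd mw rem s ls
        = pvALoop dd mw (PySem.List.sorted rem (fun k => dd.getD k 0) false) s ls := by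
  intro n
  induction n with
  | zero =>
      intro rem hlen s ls
      have : rem = [] := List.eq_nil_of_length_eq_zero (Nat.le_zero.mp hlen)
      subst this
      rw [pvSelLoop]
      simp only [PySem.List.min?, List.foldl_nil]
      simp [PySem.List.sorted, pvALoop]
  | succ n ih =>
      intro rem hlen s ls
      rw [pvSelLoop]
      cases hmin : PySem.List.min? rem (fun k => dd.getD k 0) with
      | none =>
          have : rem = [] := (PySem.List.min?_eq_none_iff rem _).mp hmin
          subst this
          rfl
      | some m =>
          have hmem : m ∈ rem := PySem.List.min?_mem hmin
          have hrem : PySem.List.remove? rem m = some (rem.erase m) :=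
            PySem.List.remove?_eq_some_erase rem m hmem
          rw [pvSel _ rem hmin]
          simp only [pvALoop]
          by_cases hc : s + dd.getD m 0 < mw
          · rw [if_pos hc, if_pos hc]
            have hlen' : (rem.erase m).length ≤ n := by
              have := List.length_erase_of_mem hmem
              omega
            split
            next heq => rw [hrem] at heq; cases heq
            next rest heq =>
              rw [hrem] at heq
              cases heq
              exact ih (rem.erase m) hlen' (s + dd.getD m 0) (ls ++ [m])
          · rw [if_neg hc, if_neg hc]

-- ===== VERDICT (by name: the statement is the Claim_ definition above) =====
theorem select_orders_by_weight_spec : Claim_equal_select_orders_by_weight := by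
  intro d max_weight _
  unfold Spec_select_orders_by_weight select_orders_by_weight select_orders_by_weight_alt
  exact (pvLoop_agree (PySem.Dict.ofList d) max_weight (PySem.Dict.ofList d).keys.length
    (PySem.Dict.ofList d).keys le_rfl 0 []).symm ▸ rfl
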